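-- pv_equiv track=rewrite | github.com/juanhurtado4/cs2 | markov_sentence_generator.py | get_histogram
-- ===== SOURCE A (Python) =====
-- def get_histogram(word_list):
--     result = {}
--     for index, word in enumerate(word_list):
--         try:
--             next_word = word_list[index + 1]
--         except:
--             break
--
--         if word not in result:
--
--             result[word] = {next_word: 1}
--
--         else:
--             # {
--                 # 'fish': {'one': 1, 'red: 2'},
--                 # 'red': {'fish': 1, 'one': 2}
--             # }
--
--             if next_word not in result[word]:
--                 result[word].update({next_word: 1})
--             else:
--                  result[word][next_word] += 1
--     return result
-- ===== SOURCE B (Python) =====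
-- def get_histogram(word_list):
--     # Pass 1: group every next-word under its word (dict of lists).
--     buckets = {}
--     for word, next_word in zip(word_list, word_list[1:]):
--         buckets.setdefault(word, []).append(next_word)
--     # Pass 2: tally each per-word list into a frequency dict.
--     result = {}
--     for word, nexts in buckets.items():
--         freq = {}
--         for x in nexts:
--             freq[x] = freq.get(x, 0) + 1
--         result[word] = freq
--     return result
-- ===== Notes on version B (the rewrite author's own statement) =====
-- stated objective: alternative
-- what changed: A counts incrementally with membership checks inside one enumerate/try-except loop; B first groups next-words into per-word lists via zip+setdefault, then tallies each list into a frequency dict in a second pass.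
import Mathlib
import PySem

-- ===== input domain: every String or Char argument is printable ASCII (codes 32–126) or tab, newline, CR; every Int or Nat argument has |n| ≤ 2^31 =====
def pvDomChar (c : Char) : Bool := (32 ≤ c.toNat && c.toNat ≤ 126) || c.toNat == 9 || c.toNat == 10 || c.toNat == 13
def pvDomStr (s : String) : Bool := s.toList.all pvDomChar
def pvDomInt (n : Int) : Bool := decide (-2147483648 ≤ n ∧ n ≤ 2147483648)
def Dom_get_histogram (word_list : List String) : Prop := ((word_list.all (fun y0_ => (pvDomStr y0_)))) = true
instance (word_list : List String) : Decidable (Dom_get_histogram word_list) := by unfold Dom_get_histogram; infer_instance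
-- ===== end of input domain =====

-- B replaces A's incremental membership-check counting with a two-pass group-then-tally decomposition (objective: alternative, same cost).

-- ===== PORT A =====
-- A's loop over enumerate(word_list); the try/except IndexError + break is the `none` case of pyGet?.
def pvALoop (word_list : List String) :
    List (Int × String) → PySem.Dict String (PySem.Dict String Int) → PySem.Dict String (PySem.Dict String Int)
  | [], result => result
  | (index, word) :: rest, result =>
    match PySem.List.pyGet? word_list (index + 1) with
    | none => result  -- except: break
    | some next_word =>
      let result :=
        if result.contains word = false then
          result.insert word (PySem.Dict.empty.insert next_word 1)
        else
          if (result.getD word PySem.Dict.empty).contains next_word = false then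
            -- result[word].update({next_word: 1})  (mutates the inner dict in place)
            result.modify word PySem.Dict.empty (fun inner => inner.insert next_word 1)
          else
            -- result[word][next_word] += 1
            result.modify word PySem.Dict.empty (fun inner => inner.modify next_word 0 (· + 1))
      pvALoop word_list rest result

def get_histogram (word_list : List String) : List (String × List (String × Int)) :=
  (pvALoop word_list (PySem.List.enumerate word_list 0) PySem.Dict.empty).items.map (fun p => (p.1, p.2.items))

-- ===== PORT B =====
-- inner tally loop of Source B: freq[x] = freq.get(x, 0) + 1
def pvTally (nexts : List String) : PySem.Dict String Int :=
  nexts.foldl (fun freq x => freq.insert x (freq.getD x 0 + 1)) PySem.Dict.empty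

def get_histogram_alt (word_list : List String) : List (String × List (String × Int)) :=
  -- pass 1: zip(word_list, word_list[1:]); buckets.setdefault(word, []).append(next_word)
  let pairs := word_list.zip (PySem.List.slice word_list (some 1) none)
  let buckets := pairs.foldl (fun d p => d.modify p.1 [] (fun l => l ++ [p.2])) PySem.Dict.empty
  -- pass 2: result[word] = tally(nexts) over buckets.items()
  let result := buckets.items.foldl (fun r p => r.insert p.1 (pvTally p.2)) PySem.Dict.empty
  result.items.map (fun p => (p.1, p.2.items))

-- ===== PRECONDITION & SPEC =====
def Spec_get_histogram (word_list : List String) (out : List (String × List (String × Int))) : Prop := out = get_histogram_alt word_list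
instance (word_list : List String) (out : List (String × List (String × Int))) : Decidable (Spec_get_histogram word_list out) := by unfold Spec_get_histogram; infer_instance

-- ===== CLAIM (what is proved, stated in full; the proofs are below) =====
def Claim_equal_get_histogram : Prop := ∀ (word_list : List String), Dom_get_histogram word_list → Spec_get_histogram word_list (get_histogram word_list)

-- ===== LEMMAS AND PROOFS =====

-- A's one step, rewritten as a single nested modify (branch analysis).
def pvStepA (r : PySem.Dict String (PySem.Dict String Int)) (p : String × String) :
    PySem.Dict String (PySem.Dict String Int) :=
  r.modify p.1 PySem.Dict.empty (fun inner => inner.modify p.2 0 (· + 1))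

theorem pvALoop_step_eq (r : PySem.Dict String (PySem.Dict String Int)) (w x : String) :
    (if r.contains w = false then
        r.insert w (PySem.Dict.empty.insert x 1)
      else
        if (r.getD w PySem.Dict.empty).contains x = false then
          r.modify w PySem.Dict.empty (fun inner => inner.insert x 1)
        else
          r.modify w PySem.Dict.empty (fun inner => inner.modify x 0 (· + 1)))
      = pvStepA r (w, x) := by
  unfold pvStepA
  cases hc : r.contains w with
  | false =>
    simp only [if_true]
    show r.insert w (PySem.Dict.empty.insert x 1)
        = r.insert w ((r.getD w PySem.Dict.empty).modify x 0 (· + 1))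
    rw [PySem.Dict.getD_of_not_contains r PySem.Dict.empty hc]
    show r.insert w (PySem.Dict.empty.insert x 1)
        = r.insert w (PySem.Dict.empty.insert x (PySem.Dict.empty.getD x 0 + 1))
    rw [PySem.Dict.getD_empty]
    norm_num
  | true =>
    simp only [Bool.true_eq_false, if_false]
    cases hx : (r.getD w PySem.Dict.empty).contains x with
    | false =>
      simp only [if_true]
      show r.insert w ((r.getD w PySem.Dict.empty).insert x 1)
          = r.insert w ((r.getD w PySem.Dict.empty).insert x ((r.getD w PySem.Dict.empty).getD x 0 + 1))
      rw [PySem.Dict.getD_of_not_contains _ _ hx]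
      norm_num
    | true =>
      simp only [Bool.true_eq_false, if_false]

-- A's loop over the enumerated suffix is a fold of pvStepA over the zipped pairs of that suffix.
theorem pvALoop_eq_fold (word_list : List String) :
    ∀ (ws : List String) (i : Nat) (r : PySem.Dict String (PySem.Dict String Int)),
      word_list.drop i = ws →
      pvALoop word_list (PySem.List.enumerate ws (i : Int)) r
        = (ws.zip (word_list.drop (i + 1))).foldl pvStepA r := by
  intro ws
  induction ws with
  | nil => intro i r _; simp [PySem.List.enumerate, pvALoop]
  | cons w ws' ih =>
    intro i r hdrop
    have hdrop' : word_list.drop (i + 1) = ws' := by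
      have h2 := congrArg (List.drop 1) hdrop
      rw [List.drop_drop] at h2
      simpa using h2
    rw [PySem.List.enumerate_cons]
    cases ws' with
    | nil =>
      -- last element: word_list[i+1] raises IndexError, the bare except breaks
      have hget : PySem.List.pyGet? word_list ((i : Int) + 1) = none := by
        have hnone : word_list[i + 1]? = none := by
          rw [List.getElem?_eq_none_iff]
          have := List.drop_eq_nil_iff.mp hdrop'
          omega
        have hcast : ((i : Int) + 1) = ((i + 1 : Nat) : Int) := by push_cast; ring
        rw [hcast, PySem.List.pyGet?_natCast, hnone]
      simp [pvALoop, hget, hdrop']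
    | cons w' ws'' =>
      have hdrop'' : word_list.drop (i + 1 + 1) = ws'' := by
        have h2 := congrArg (List.drop 1) hdrop'
        rw [List.drop_drop] at h2
        simpa using h2
      have hget : PySem.List.pyGet? word_list ((i : Int) + 1) = some w' := by
        have hsome : word_list[i + 1]? = some w' := by
          have h0 : (word_list.drop (i + 1))[0]? = some w' := by rw [hdrop']; rfl
          rwa [List.getElem?_drop, Nat.add_zero] at h0
        have hcast : ((i : Int) + 1) = ((i + 1 : Nat) : Int) := by push_cast; ring
        rw [hcast, PySem.List.pyGet?_natCast, hsome]
      rw [hdrop', List.zip_cons_cons, List.foldl_cons]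
      unfold pvALoop
      rw [hget]
      simp only
      rw [pvALoop_step_eq r w w']
      have hcast : ((i : Int) + 1) = ((i + 1 : Nat) : Int) := by push_cast; ring
      rw [hcast, ih (i + 1) (pvStepA r (w, w')) hdrop', hdrop'']

-- Lookup through A's fold: per key, the fold acts on the filtered next-words.
theorem pvFoldA_getD (ps : List (String × String)) :
    ∀ (r : PySem.Dict String (PySem.Dict String Int)) (w : String),
      (ps.foldl pvStepA r).getD w PySem.Dict.empty
        = ((ps.filter (fun p => p.1 == w)).map (·.2)).foldl
            (fun inn x => inn.modify x 0 (· + 1)) (r.getD w PySem.Dict.empty) := by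
  induction ps with
  | nil => intro r w; simp
  | cons p ps ih =>
    intro r w
    rw [List.foldl_cons, ih]
    by_cases h : p.1 = w
    · have : (pvStepA r p).getD w PySem.Dict.empty
          = (r.getD w PySem.Dict.empty).modify p.2 0 (· + 1) := by
        unfold pvStepA; rw [← h]; exact PySem.Dict.getD_modify_self _ _ _ _
      rw [this]
      simp [h]
    · have : (pvStepA r p).getD w PySem.Dict.empty = r.getD w PySem.Dict.empty := by
        unfold pvStepA
        exact PySem.Dict.getD_modify_of_ne r PySem.Dict.empty _ (fun hq => h hq.symm)
      rw [this]
      have hb : (p.1 == w) = false := by simp [h]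
      simp [hb]

-- The canonical description both sides reach.
theorem pvA_items (ps : List (String × String)) :
    (ps.foldl pvStepA PySem.Dict.empty).items
      = (PySem.Set.ofList (ps.map (·.1))).map
          (fun w => (w, PySem.Dict.counter ((ps.filter (fun p => p.1 == w)).map (·.2)))) := by
  have hnd : (ps.foldl pvStepA PySem.Dict.empty).keys.Nodup := by
    unfold pvStepA
    exact PySem.Dict.nodup_keys_foldl_modify_key ps (·.1) PySem.Dict.empty _ PySem.Dict.empty
      (by simp [PySem.Dict.keys_empty])
  have hkeys : (ps.foldl pvStepA PySem.Dict.empty).keys = PySem.Set.ofList (ps.map (·.1)) := by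
    unfold pvStepA
    rw [PySem.Dict.keys_foldl_modify_key, PySem.Dict.keys_empty, PySem.Set.update_nil_left]
  rw [PySem.Dict.items_eq_map_keys _ hnd PySem.Dict.empty, hkeys]
  apply List.map_congr_left
  intro w _
  rw [pvFoldA_getD ps PySem.Dict.empty w]
  rw [PySem.Dict.getD_empty, PySem.Dict.counter_eq_foldl]

theorem pvB_items (ps : List (String × String)) :
    ((ps.foldl (fun d p => d.modify p.1 [] (fun l => l ++ [p.2])) PySem.Dict.empty).items.foldl
        (fun r p => r.insert p.1 (pvTally p.2)) PySem.Dict.empty).items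
      = (PySem.Set.ofList (ps.map (·.1))).map
          (fun w => (w, PySem.Dict.counter ((ps.filter (fun p => p.1 == w)).map (·.2)))) := by
  set buckets := ps.foldl (fun d p => d.modify p.1 [] (fun l => l ++ [p.2])) PySem.Dict.empty with hb
  have hnd : buckets.keys.Nodup := by
    rw [hb]
    exact PySem.Dict.nodup_keys_foldl_modify_key ps (·.1) [] _ PySem.Dict.empty
      (by simp [PySem.Dict.keys_empty])
  have hkeys : buckets.keys = PySem.Set.ofList (ps.map (·.1)) := by
    rw [hb, PySem.Dict.keys_foldl_modify_key, PySem.Dict.keys_empty, PySem.Set.update_nil_left]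
  have hfresh : ∀ a ∈ buckets.items,
      (PySem.Dict.empty : PySem.Dict String (PySem.Dict String Int)).contains a.1 = false := by
    intro a _; exact PySem.Dict.contains_empty _
  have hmapnd : (buckets.items.map (fun p => p.1)).Nodup := hnd
  rw [PySem.Dict.items_foldl_insert_fresh buckets.items (fun p => p.1) (fun p => pvTally p.2)
        PySem.Dict.empty hfresh hmapnd]
  have hemp : (PySem.Dict.empty : PySem.Dict String (PySem.Dict String Int)).items = [] := rfl
  rw [hemp, List.nil_append]
  rw [PySem.Dict.items_eq_map_keys buckets hnd [], hkeys, List.map_map]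
  apply List.map_congr_left
  intro w _
  simp only [Function.comp]
  congr 1
  have hgd : buckets.getD w [] = (ps.filter (fun p => p.1 == w)).map (·.2) := by
    rw [hb, PySem.Dict.getD_foldl_modify_append, PySem.Dict.getD_empty, List.nil_append]
  rw [hgd]
  unfold pvTally
  rw [PySem.Dict.foldl_insert_getD_add_one_eq_counter]

-- ===== VERDICT (by name: the statement is the Claim_ definition above) =====
theorem get_histogram_spec : Claim_equal_get_histogram := by
  intro word_list _
  unfold Spec_get_histogram get_histogram get_histogram_alt
  have hzipA := pvALoop_eq_fold word_list word_list 0 PySem.Dict.empty rfl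
  simp only [Nat.zero_add] at hzipA
  have hslice : PySem.List.slice word_list (some 1) none = word_list.drop 1 := by
    rw [PySem.List.slice_from_one, List.drop_one]
  rw [hslice]
  show (pvALoop word_list (PySem.List.enumerate word_list ((0:Nat):Int)) PySem.Dict.empty).items.map
        (fun p => (p.1, p.2.items))
      = ((((word_list.zip (word_list.drop 1)).foldl
            (fun d p => d.modify p.1 [] (fun l => l ++ [p.2])) PySem.Dict.empty).items).foldl
          (fun r p => r.insert p.1 (pvTally p.2)) PySem.Dict.empty).items.map
        (fun p => (p.1, p.2.items))
  rw [hzipA, pvA_items, pvB_items]
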